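-- pv_equiv track=rewrite | github.com/dlapochkin/case.7 | main.py | associations
-- ===== SOURCE A (Python) =====
-- def associations(raw, uniq):
--     """
--     Creates list of words associations
--     :param raw: all words from the text
--     :param uniq: list of uniq words
--     :return: list of words associations
--     """
--     words = []
--     for word in uniq:
--         raw_copy = raw.copy()
--         that = []
--         for i in range(raw.count(word)):
--             ind = raw_copy.index(word)
--             raw_copy.remove(word)
--             if ind != len(raw_copy) and raw_copy[ind] not in that:
--                 that.append(raw_copy[ind])
--         words.append(that)
--     return words
-- ===== SOURCE B (Python) =====
-- def associations(raw, uniq):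
--     """One pass: dict word -> ordered deduped list of successors, then emit in uniq order."""
--     succ = {}
--     for a, b in zip(raw, raw[1:]):
--         lst = succ.setdefault(a, [])
--         if b not in lst:
--             lst.append(b)
--     return [succ.get(w, []) for w in uniq]
-- ===== Notes on version B (the rewrite author's own statement) =====
-- stated objective: faster
-- what changed: Replaces A's per-uniq-word quadratic rescans (count, repeated index/remove on a fresh copy of raw) with a single pass over adjacent pairs of raw building a dict word -> ordered deduplicated successor list, then emitting lookups in uniq order.
import Mathlib
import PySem

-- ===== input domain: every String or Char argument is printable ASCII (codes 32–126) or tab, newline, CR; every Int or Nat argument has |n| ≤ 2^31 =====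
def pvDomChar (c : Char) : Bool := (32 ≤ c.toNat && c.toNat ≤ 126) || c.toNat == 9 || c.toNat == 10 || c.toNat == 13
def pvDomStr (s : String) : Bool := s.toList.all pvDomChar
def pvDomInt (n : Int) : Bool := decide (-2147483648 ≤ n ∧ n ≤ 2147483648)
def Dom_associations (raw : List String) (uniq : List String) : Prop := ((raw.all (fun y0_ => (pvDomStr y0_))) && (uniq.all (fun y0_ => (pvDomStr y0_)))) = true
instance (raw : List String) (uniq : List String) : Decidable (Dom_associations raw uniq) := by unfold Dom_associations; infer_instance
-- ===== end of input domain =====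

-- B replaces A's per-uniq-word quadratic rescans (count/index/remove on a fresh copy of raw)
-- by one pass over adjacent pairs building a dict word -> ordered deduped successor list; faster (asymptotic).

-- ===== PORT A =====
-- inner loop of A: 'for i in range(raw.count(word))' with state (raw_copy, that); i unused
def assocInnerA (w : String) : Nat → List String → List String → List String
  | 0, _, that => that
  | n + 1, rc, that =>
    match PySem.List.index? rc w with
    | none => that      -- unreachable when n + 1 ≤ count: .index would raise
    | some ind =>
      match PySem.List.remove? rc w with
      | none => that    -- unreachable likewise
      | some rc' =>
        let that' :=
          if ind ≠ rc'.length then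
            match PySem.List.pyGet? rc' (ind : Int) with
            | some x => if that.contains x then that else that ++ [x]
            | none => that
          else that
        assocInnerA w n rc' that'

def associations (raw : List String) (uniq : List String) : List (List String) :=
  uniq.foldl (fun words w => words ++ [assocInnerA w (PySem.List.count raw w) raw []]) []

-- ===== PORT B =====
-- one pass over zip(raw, raw[1:]): lst = succ.setdefault(a, []); if b not in lst: lst.append(b)
def succStep (d : PySem.Dict String (List String)) (p : String × String) : PySem.Dict String (List String) :=
  let d1 := d.setdefault p.1 []
  let lst := d1.getD p.1 []
  if lst.contains p.2 then d1 else d1.insert p.1 (lst ++ [p.2])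

def succDict (raw : List String) : PySem.Dict String (List String) :=
  (raw.zip raw.tail).foldl succStep PySem.Dict.empty

def associations_alt (raw : List String) (uniq : List String) : List (List String) :=
  uniq.map (fun w => (succDict raw).getD w [])

-- ===== PRECONDITION & SPEC =====
def Spec_associations (raw : List String) (uniq : List String) (out : List (List String)) : Prop := out = associations_alt raw uniq
instance (raw : List String) (uniq : List String) (out : List (List String)) : Decidable (Spec_associations raw uniq out) := by unfold Spec_associations; infer_instance

-- ===== CLAIM (what is proved, stated in full; the proofs are below) =====
def Claim_equal_associations : Prop := ∀ (raw : List String) (uniq : List String), Dom_associations raw uniq → Spec_associations raw uniq (associations raw uniq)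

-- ===== LEMMAS AND PROOFS =====

-- canonical form both sides reduce to: scan adjacent pairs, collecting deduped successors of w
def canonW (w : String) : List String → List String → List String
  | [], acc => acc
  | [_], acc => acc
  | a :: b :: t, acc =>
    canonW w (b :: t) (if a = w ∧ ¬ acc.contains b then acc ++ [b] else acc)

theorem canonW_of_not_mem (w : String) (l acc : List String) (h : w ∉ l) :
    canonW w l acc = acc := by
  induction l generalizing acc with
  | nil => rfl
  | cons a t ih =>
    cases t with
    | nil => rfl
    | cons b t' =>
      simp only [canonW]
      have ha : a ≠ w := by intro e; exact h (by simp [e])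
      rw [if_neg (by simp [ha])]
      exact ih acc (fun hm => h (List.mem_cons_of_mem _ hm))

theorem canonW_append (w : String) (pre : List String) (h : w ∉ pre) (l acc : List String) :
    canonW w (pre ++ l) acc = canonW w l acc := by
  induction pre generalizing acc with
  | nil => rfl
  | cons p pre' ih =>
    have hp : p ≠ w := by intro e; exact h (by simp [e])
    have h' : w ∉ pre' := fun hm => h (List.mem_cons_of_mem _ hm)
    cases hpl : pre' ++ l with
    | nil =>
      rcases List.append_eq_nil_iff.1 hpl with ⟨e1, e2⟩
      subst e1; subst e2; rfl
    | cons q t =>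
      simp only [List.cons_append, hpl, canonW]
      rw [if_neg (by simp [hp]), ← hpl]
      exact ih h' acc

-- A's inner loop computes canonW
theorem assocInnerA_eq_canonW (w : String) (n : Nat) (rc that : List String)
    (hc : PySem.List.count rc w = n) :
    assocInnerA w n rc that = canonW w rc that := by
  induction n generalizing rc that with
  | zero =>
    have : w ∉ rc := by
      rw [PySem.List.count_eq] at hc
      exact (List.count_eq_zero.mp hc)
    simp [assocInnerA, canonW_of_not_mem w rc that this]
  | succ n ih =>
    have hmem : w ∈ rc := by
      rw [PySem.List.count_eq] at hc
      exact List.count_pos_iff.mp (by omega)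
    obtain ⟨k, hk⟩ := (PySem.List.index?_isSome_iff rc w).2 hmem |> Option.isSome_iff_exists.mp
    obtain ⟨pre, suf, hrc, hlen, hpre⟩ := (PySem.List.index?_eq_some_iff rc w k).1 hk
    have hrm : PySem.List.remove? rc w = some (pre ++ suf) := by
      rw [PySem.List.remove?_eq_some_erase rc w hmem, hrc,
        List.erase_append_right _ (by simpa using hpre), List.erase_cons_head]
    have hcount : PySem.List.count (pre ++ suf) w = n := by
      rw [PySem.List.count_eq] at hc ⊢
      rw [hrc] at hc
      simp [List.count_append] at hc ⊢
      omega
    subst hrc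
    simp only [assocInnerA, hk, hrm]
    cases suf with
    | nil =>
      -- occurrence at the end: guard fails (ind = length), and w ∉ pre forces n = 0
      have hpre0 : List.count w pre = 0 := List.count_eq_zero.mpr (by simpa using hpre)
      have hn0 : n = 0 := by
        rw [PySem.List.count_eq] at hcount; simp [hpre0] at hcount; omega
      subst hn0
      rw [if_neg (by subst hlen; simp)]
      simp only [assocInnerA]
      rw [canonW_append w pre (by simpa using hpre)]
      rfl
    | cons b suf' =>
      have hget : PySem.List.pyGet? (pre ++ b :: suf') ((k : Nat) : Int) = some b := by
        subst hlen; exact PySem.List.pyGet?_append_length pre suf' b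
      have hne : k ≠ (pre ++ b :: suf').length := by
        subst hlen; simp
      rw [if_pos hne, hget]
      rw [canonW_append w pre (by simpa using hpre)]
      simp only [canonW]
      rw [ih (pre ++ b :: suf') _ hcount]
      rw [canonW_append w pre (by simpa using hpre)]
      congr 1
      by_cases hb : b ∈ that
      · simp [hb]
      · simp [hb]


-- B's dict fold computes canonW at every key
theorem getD_succStep (d : PySem.Dict String (List String)) (a b w : String) :
    (succStep d (a, b)).getD w [] =
      if a = w ∧ ¬ (d.getD w []).contains b then d.getD w [] ++ [b] else d.getD w [] := by
  simp only [succStep]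
  by_cases hcont : d.contains a
  · rw [PySem.Dict.setdefault_of_contains d ([] : List String) hcont]
    by_cases haw : a = w
    · subst haw
      by_cases hb : b ∈ d.getD a []
      · simp [hb]
      · simp [hb, PySem.Dict.getD_insert_self]
    · have hwa : ¬ w = a := fun e => haw e.symm
      by_cases hb : b ∈ d.getD a []
      · simp [hb, haw]
      · simp [hb, haw, hwa, PySem.Dict.getD_insert]
  · rw [PySem.Dict.setdefault_of_not_contains d ([] : List String) (by simpa using hcont)]
    have hda : d.getD a [] = [] := PySem.Dict.getD_of_not_contains d ([] : List String) (by simpa using hcont)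
    by_cases haw : a = w
    · subst haw
      simp [hda, PySem.Dict.getD_insert_self, PySem.Dict.insert_insert_self]
    · have hwa : ¬ w = a := fun e => haw e.symm
      simp [haw, hwa, PySem.Dict.getD_insert, PySem.Dict.getD_insert_self]

theorem getD_fold_succStep (raw : List String) (d : PySem.Dict String (List String)) (w : String) :
    ((raw.zip raw.tail).foldl succStep d).getD w [] = canonW w raw (d.getD w []) := by
  induction raw generalizing d with
  | nil => rfl
  | cons a t ih =>
    cases t with
    | nil => rfl
    | cons b t' =>
      simp only [List.tail_cons, List.zip_cons_cons, List.foldl_cons]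
      simp only [List.tail_cons] at ih
      rw [ih (succStep d (a, b)), getD_succStep]
      rfl

theorem per_word (raw : List String) (w : String) :
    assocInnerA w (PySem.List.count raw w) raw [] = (succDict raw).getD w [] := by
  rw [assocInnerA_eq_canonW w _ raw [] rfl]
  unfold succDict
  rw [getD_fold_succStep raw PySem.Dict.empty w]
  simp [PySem.Dict.getD_empty]

-- ===== VERDICT (by name: the statement is the Claim_ definition above) =====
theorem associations_spec : Claim_equal_associations := by
  intro raw uniq _
  unfold Spec_associations associations associations_alt
  rw [PySem.List.foldl_append_singleton_eq_map]
  simp only [List.nil_append]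
  exact List.map_congr_left (fun w _ => per_word raw w)
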